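-- pv_equiv track=rewrite | github.com/YashPatkar/dsapython | test.py | largestFunc
-- ===== SOURCE A (Python) =====
-- def largestFunc(arr):
--   largest = arr[0]
--   index = 0
--   for i in range(len(arr)):
--     if arr[i] >= largest:
--       largest = arr[i]
--       index = i
--   return [index, largest]
-- ===== SOURCE B (Python) =====
-- def largestFunc(arr):
--   # two separate passes: first compute the maximum, then the last index holding it
--   largest = arr[0]
--   for x in arr:
--     if x > largest:
--       largest = x
--   index = 0
--   for i, x in enumerate(arr):
--     if x == largest:
--       index = i
--   return [index, largest]
-- ===== Notes on version B (the rewrite author's own statement) =====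
-- stated objective: alternative
-- what changed: A finds the maximum and its last index in one interleaved pass updating both on '>='; B does two separated passes: a plain running-max pass over the values, then a pass over enumerate(arr) recording the last index equal to the maximum.
import Mathlib
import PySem

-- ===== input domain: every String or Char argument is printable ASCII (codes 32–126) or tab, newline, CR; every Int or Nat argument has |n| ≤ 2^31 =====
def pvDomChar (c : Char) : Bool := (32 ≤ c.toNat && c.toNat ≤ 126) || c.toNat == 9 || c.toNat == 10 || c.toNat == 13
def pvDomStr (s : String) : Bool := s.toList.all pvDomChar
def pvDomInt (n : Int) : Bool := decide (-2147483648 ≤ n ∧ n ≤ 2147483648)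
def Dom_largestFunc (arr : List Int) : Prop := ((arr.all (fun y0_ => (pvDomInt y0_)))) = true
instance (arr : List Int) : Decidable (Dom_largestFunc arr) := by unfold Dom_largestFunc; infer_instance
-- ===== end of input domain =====

-- B replaces A's single interleaved max+index pass by two separated passes (running max, then last index equal to it); same O(n) cost, different decomposition.


-- ===== PORT A =====
def largestFunc (arr : List Int) : List Int :=
  let st := (PySem.List.pyRange 0 (arr.length : Int) 1).foldl
    (fun (s : Int × Int) i =>
      if PySem.List.pyGetD arr i 0 ≥ s.1 then (PySem.List.pyGetD arr i 0, i) else s)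
    (PySem.List.pyGetD arr 0 0, 0)
  [st.2, st.1]

-- ===== PORT B =====
def largestFunc_alt (arr : List Int) : List Int :=
  let largest := arr.foldl (fun l x => if x > l then x else l) (PySem.List.pyGetD arr 0 0)
  let index := (PySem.List.enumerate arr 0).foldl
    (fun (acc : Int) p => if p.2 = largest then p.1 else acc) 0
  [index, largest]

-- ===== PRECONDITION & SPEC =====
-- Pre_: arr must be nonempty (arr[0] raises IndexError on the empty list in A; B raises there too).
def Pre_largestFunc (arr : List Int) : Prop := arr ≠ []
instance (arr : List Int) : Decidable (Pre_largestFunc arr) := by unfold Pre_largestFunc; infer_instance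
def pvWitness_largestFunc : List Int := [3, 7, 7, 2]

def Spec_largestFunc (arr : List Int) (out : List Int) : Prop := out = largestFunc_alt arr
instance (arr : List Int) (out : List Int) : Decidable (Spec_largestFunc arr out) := by unfold Spec_largestFunc; infer_instance

-- ===== CLAIM (what is proved, stated in full; the proofs are below) =====
def Claim_equal_largestFunc : Prop := ∀ (arr : List Int), Dom_largestFunc arr → Pre_largestFunc arr → Spec_largestFunc arr (largestFunc arr)

-- ===== LEMMAS AND PROOFS =====

-- running max over pairs' second components (A's 'largest' / B's first pass, shared shape)
def mfold (l : List (Int × Int)) (L : Int) : Int :=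
  l.foldl (fun m p => if p.2 > m then p.2 else m) L

-- last index whose value equals M, default acc (B's second pass, shared shape)
def gfold (l : List (Int × Int)) (M acc : Int) : Int :=
  l.foldl (fun acc p => if p.2 = M then p.1 else acc) acc

lemma mfold_cons (p : Int × Int) (t : List (Int × Int)) (L : Int) :
    mfold (p :: t) L = mfold t (if p.2 > L then p.2 else L) := rfl

lemma gfold_cons (p : Int × Int) (t : List (Int × Int)) (M a : Int) :
    gfold (p :: t) M a = gfold t M (if p.2 = M then p.1 else a) := rfl

lemma le_mfold (l : List (Int × Int)) (x : Int) : x ≤ mfold l x := by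
  induction l generalizing x with
  | nil => simp [mfold]
  | cons p t ih =>
    rw [mfold_cons]
    split_ifs with h
    · exact le_trans (le_of_lt h) (ih p.2)
    · exact ih x

lemma mfold_mem (l : List (Int × Int)) (x : Int) :
    mfold l x = x ∨ ∃ q ∈ l, q.2 = mfold l x := by
  induction l generalizing x with
  | nil => left; simp [mfold]
  | cons p t ih =>
    rw [mfold_cons]
    split_ifs with h
    · rcases ih p.2 with h1 | ⟨q, hq, hq2⟩
      · right; exact ⟨p, by simp, h1.symm⟩
      · right; exact ⟨q, by simp [hq], hq2⟩
    · rcases ih x with h1 | ⟨q, hq, hq2⟩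
      · exact Or.inl h1
      · exact Or.inr ⟨q, List.mem_cons_of_mem p hq, hq2⟩

lemma gfold_irrel (l : List (Int × Int)) (M a b : Int)
    (h : ∃ q ∈ l, q.2 = M) : gfold l M a = gfold l M b := by
  induction l generalizing a b with
  | nil => rcases h with ⟨q, hq, _⟩; simp at hq
  | cons p t ih =>
    rw [gfold_cons, gfold_cons]
    by_cases hp : p.2 = M
    · rw [if_pos hp, if_pos hp]
    · rw [if_neg hp, if_neg hp]
      rcases h with ⟨q, hq, hq2⟩
      rcases List.mem_cons.1 hq with rfl | hq'
      · exact absurd hq2 hp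
      · exact ih a b ⟨q, hq', hq2⟩

-- characterisation of A's interleaved fold: largest is the running max, index is the
-- last index whose value equals it
lemma fold_char (l : List (Int × Int)) (L I : Int) :
    l.foldl (fun (s : Int × Int) p => if p.2 ≥ s.1 then (p.2, p.1) else s) (L, I)
      = (mfold l L, gfold l (mfold l L) I) := by
  induction l generalizing L I with
  | nil => simp [mfold, gfold]
  | cons p t ih =>
    rw [List.foldl_cons, mfold_cons, gfold_cons]
    by_cases h : p.2 ≥ L
    · rw [if_pos h]
      have hm : (if p.2 > L then p.2 else L) = p.2 := by split_ifs with h' <;> omega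
      simp only [hm]
      rw [ih p.2 p.1]
      by_cases he : p.2 = mfold t p.2
      · rw [if_pos he]
      · rw [if_neg he]
        have hlt : p.2 < mfold t p.2 := lt_of_le_of_ne (le_mfold t p.2) he
        have hex : ∃ q ∈ t, q.2 = mfold t p.2 := by
          rcases mfold_mem t p.2 with h1 | h2
          · omega
          · exact h2
        exact congrArg _ (gfold_irrel t _ p.1 I hex)
    · rw [if_neg h]
      have hm : (if p.2 > L then p.2 else L) = L := by split_ifs with h' <;> omega
      simp only [hm]
      rw [ih L I]
      have hne : ¬ p.2 = mfold t L := by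
        have := le_mfold t L; omega
      rw [if_neg hne]

-- A's fold over range(len(arr)) with indexing is the fold over enumerate(arr)
lemma foldA_enumerate (arr : List Int) :
    (PySem.List.pyRange 0 (arr.length : Int) 1).foldl
      (fun (s : Int × Int) i =>
        if PySem.List.pyGetD arr i 0 ≥ s.1 then (PySem.List.pyGetD arr i 0, i) else s)
      (PySem.List.pyGetD arr 0 0, 0)
      = (PySem.List.enumerate arr 0).foldl
          (fun (s : Int × Int) p => if p.2 ≥ s.1 then (p.2, p.1) else s)
          (PySem.List.pyGetD arr 0 0, 0) := by
  rw [PySem.List.enumerate_eq_map_pyRange arr (0 : Int), List.foldl_map]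
  simp only [PySem.List.len_eq]

-- B's first pass equals mfold over enumerate
lemma mfold_values (arr : List Int) (L : Int) :
    arr.foldl (fun l x => if x > l then x else l) L
      = mfold (PySem.List.enumerate arr 0) L := by
  conv_lhs => rw [(PySem.List.map_snd_enumerate arr 0).symm]
  rw [List.foldl_map]; rfl

-- ===== VERDICT (by name: the statement is the Claim_ definition above) =====
theorem largestFunc_spec : Claim_equal_largestFunc := by
  intro arr _ _
  unfold Spec_largestFunc largestFunc largestFunc_alt
  rw [foldA_enumerate, fold_char, mfold_values]
  rfl
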